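-- pv_equiv track=rewrite | github.com/phona/sisyphus | orchestrator/tests/test_contract_archlab_cookbook_helm_redo.py | _get_printf_line
-- ===== SOURCE A (Python) =====
-- def _get_printf_line(up_body: str) -> str:
--     """Return the line(s) that contain the printf command in the accept-env-up recipe."""
--     # printf may span multiple lines via \ continuation; collect them
--     lines = up_body.splitlines()
--     printf_lines: list[str] = []
--     collecting = False
--     for line in lines:
--         stripped = line.strip()
--         if "printf" in stripped and not collecting:
--             collecting = True
--             printf_lines.append(stripped)
--             if not stripped.endswith("\\"):
--                 break
--         elif collecting:
--             printf_lines.append(stripped)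
--             if not stripped.endswith("\\"):
--                 break
--     return " ".join(printf_lines)
-- ===== SOURCE B (Python) =====
-- def _get_printf_line(up_body: str) -> str:
--     """Return the line(s) that contain the printf command in the accept-env-up recipe."""
--     # Single back-to-front pass: 'chunk' is the backslash-continuation block that
--     # starts at the current line; seeing a printf line makes that block the answer
--     # (processing right-to-left, the last update corresponds to the FIRST printf line).
--     ans: list[str] = []
--     chunk: list[str] = []
--     for line in reversed(up_body.splitlines()):
--         s = line.strip()
--         chunk = [s] + (chunk if s.endswith("\\") else [])
--         if "printf" in s:
--             ans = chunk
--     return " ".join(ans)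
-- ===== Notes on version B (the rewrite author's own statement) =====
-- stated objective: alternative
-- what changed: Replaced A's forward flag-driven scan by a single back-to-front pass that maintains the backslash-continuation chunk starting at each line and overwrites the answer whenever a printf line is seen, so the earliest printf line's chunk wins.
import Mathlib
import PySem

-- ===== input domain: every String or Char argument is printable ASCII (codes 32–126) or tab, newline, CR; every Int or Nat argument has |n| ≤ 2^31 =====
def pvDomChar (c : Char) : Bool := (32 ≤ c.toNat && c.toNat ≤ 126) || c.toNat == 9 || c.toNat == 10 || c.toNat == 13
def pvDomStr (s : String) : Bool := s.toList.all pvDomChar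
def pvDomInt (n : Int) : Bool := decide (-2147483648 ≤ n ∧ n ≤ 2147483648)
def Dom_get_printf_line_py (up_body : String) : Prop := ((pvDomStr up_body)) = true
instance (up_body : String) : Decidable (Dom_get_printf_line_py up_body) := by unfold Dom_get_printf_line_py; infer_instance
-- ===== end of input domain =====

-- B replaces A's forward flag-driven scan by one back-to-front pass maintaining the
-- continuation chunk of each suffix; objective: alternative. Return values only.

-- ===== PORT A =====
-- A's loop: state = (printf_lines acc, collecting flag); 'break' = return the acc.
def pvGoA : List String → List String → Bool → List String
  | [], acc, _ => acc
  | line :: rest, acc, collecting =>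
    let stripped := PySem.Str.strip line
    if PySem.Str.isIn "printf" stripped && !collecting then
      if !(PySem.Str.endswith stripped "\\") then acc ++ [stripped]
      else pvGoA rest (acc ++ [stripped]) true
    else if collecting then
      if !(PySem.Str.endswith stripped "\\") then acc ++ [stripped]
      else pvGoA rest (acc ++ [stripped]) collecting
    else pvGoA rest acc collecting

def get_printf_line_py (up_body : String) : String :=
  PySem.Str.join " " (pvGoA (PySem.Str.splitlines up_body) [] false)

-- ===== PORT B =====
-- Source B's loop body: state = (ans, chunk), one step per line, iterated over reversed lines.
def pvStepB (st : List String × List String) (line : String) : List String × List String :=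
  let s := PySem.Str.strip line
  let chunk := s :: (if PySem.Str.endswith s "\\" then st.2 else [])
  ((if PySem.Str.isIn "printf" s then chunk else st.1), chunk)

def get_printf_line_py_alt (up_body : String) : String :=
  PySem.Str.join " " ((PySem.Str.splitlines up_body).reverse.foldl pvStepB ([], [])).1

-- ===== PRECONDITION & SPEC =====
def Spec_get_printf_line_py (up_body : String) (out : String) : Prop := out = get_printf_line_py_alt up_body
instance (up_body : String) (out : String) : Decidable (Spec_get_printf_line_py up_body out) := by unfold Spec_get_printf_line_py; infer_instance

-- ===== CLAIM (what is proved, stated in full; the proofs are below) =====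
def Claim_equal_get_printf_line_py : Prop := ∀ (up_body : String), Dom_get_printf_line_py up_body → Spec_get_printf_line_py up_body (get_printf_line_py up_body)

-- ===== LEMMAS AND PROOFS =====

-- proof-side characterisations (used by the proofs only, not by the ports):
-- the continuation chunk starting at the head of a (stripped) line list
def pvChunk : List String → List String
  | [] => []
  | s :: rest => s :: (if PySem.Str.endswith s "\\" then pvChunk rest else [])

-- the chunk of the suffix starting at the first line containing "printf" (if any)
def pvAns : List String → List String
  | [] => []
  | s :: rest =>
    if PySem.Str.isIn "printf" s then s :: (if PySem.Str.endswith s "\\" then pvChunk rest else [])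
    else pvAns rest

-- Once A is collecting, it appends exactly the chunk of the remaining stripped lines.
lemma pvGoA_true (L : List String) : ∀ acc : List String,
    pvGoA L acc true = acc ++ pvChunk (L.map PySem.Str.strip) := by
  induction L with
  | nil => intro acc; simp [pvGoA, pvChunk]
  | cons l rest ih =>
    intro acc
    simp only [pvGoA, pvChunk, List.map_cons]
    by_cases h : PySem.Chars.endswith (PySem.Chars.strip l.toList) ['\\'] = true
    · simp [h, ih]
    · simp [h]

-- A's full loop computes pvAns of the stripped lines.
lemma pvGoA_false (L : List String) : ∀ acc : List String,
    pvGoA L acc false = acc ++ pvAns (L.map PySem.Str.strip) := by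
  induction L with
  | nil => intro acc; simp [pvGoA, pvAns]
  | cons l rest ih =>
    intro acc
    simp only [pvGoA, pvAns, List.map_cons, Bool.not_false, Bool.and_true]
    by_cases hp : PySem.Chars.isIn ['p', 'r', 'i', 'n', 't', 'f'] (PySem.Chars.strip l.toList) = true
    · by_cases h : PySem.Chars.endswith (PySem.Chars.strip l.toList) ['\\'] = true
      · simp [hp, h, pvGoA_true]
      · simp [hp, h]
    · simp [hp, ih]

-- B's backward fold computes (pvAns, pvChunk) of the stripped lines.
lemma pvFoldB (L : List String) :
    L.reverse.foldl pvStepB ([], []) =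
      (pvAns (L.map PySem.Str.strip), pvChunk (L.map PySem.Str.strip)) := by
  rw [List.foldl_reverse]
  induction L with
  | nil => simp [pvAns, pvChunk]
  | cons l rest ih =>
    rw [List.foldr_cons, ih]
    simp only [List.map_cons, pvStepB, pvAns, pvChunk]

-- ===== VERDICT (by name: the statement is the Claim_ definition above) =====
theorem get_printf_line_py_spec : Claim_equal_get_printf_line_py := by
  intro up_body _
  unfold Spec_get_printf_line_py get_printf_line_py get_printf_line_py_alt
  rw [pvGoA_false, pvFoldB]
  simp
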